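-- pv_equiv track=rewrite | github.com/utah-cs3960-sp26/final-project-u1316000 | app/tools/run_story_worker_local.py | scene_body_issues_require_scene_plan_rewind
-- ===== SOURCE A (Python) =====
-- def scene_body_issues_require_scene_plan_rewind(issues: list[str] | None) -> bool:
--     return any(
--         "Return to scene_plan and either add the proper casting or declare a new character" in issue
--         or "Return to scene_plan and add another named character" in issue
--         or "Return to scene_plan and add NEW_CHARACTERS plus NEW_CHARACTER_INTRO" in issue
--         or "Return to scene_plan and change LOCATION_STATUS/NEW_LOCATION" in issue
--         or "Return to scene_plan and strengthen LOCATION_STATUS/NEW_LOCATION" in issue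
--         or "Return to scene_plan and change LOCATION_STATUS so the child scene actually moves now" in issue
--         or "Return to scene_plan and strengthen LOCATION_STATUS/RETURN_LOCATION setup" in issue
--         for issue in (issues or [])
--     )
-- ===== SOURCE B (Python) =====
-- STEM = "Return to scene_plan and "
--
-- SUFFIXES = (
--     "either add the proper casting or declare a new character",
--     "add another named character",
--     "add NEW_CHARACTERS plus NEW_CHARACTER_INTRO",
--     "change LOCATION_STATUS/NEW_LOCATION",
--     "strengthen LOCATION_STATUS/NEW_LOCATION",
--     "change LOCATION_STATUS so the child scene actually moves now",
--     "strengthen LOCATION_STATUS/RETURN_LOCATION setup",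
-- )
--
--
-- def scene_body_issues_require_scene_plan_rewind(issues: "list[str] | None") -> bool:
--     # All seven trigger phrases share the stem "Return to scene_plan and ".
--     # Scan each issue once by position: at every anchor where the stem starts,
--     # check whether one of the seven suffixes follows.  phrase = STEM + suffix
--     # occurs in issue  iff  some position anchors STEM with that suffix after it.
--     n = len(STEM)
--     for issue in issues or []:
--         for j in range(len(issue)):
--             if issue.startswith(STEM, j) and issue.startswith(SUFFIXES, j + n):
--                 return True
--     return False
-- ===== Notes on version B (the rewrite author's own statement) =====
-- stated objective: alternative
-- what changed: B factors the shared stem 'Return to scene_plan and ' out of the seven phrases and scans each issue once by position, checking at every stem anchor whether one of the seven suffixes follows, instead of running seven independent whole-phrase substring searches.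
import Mathlib
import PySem

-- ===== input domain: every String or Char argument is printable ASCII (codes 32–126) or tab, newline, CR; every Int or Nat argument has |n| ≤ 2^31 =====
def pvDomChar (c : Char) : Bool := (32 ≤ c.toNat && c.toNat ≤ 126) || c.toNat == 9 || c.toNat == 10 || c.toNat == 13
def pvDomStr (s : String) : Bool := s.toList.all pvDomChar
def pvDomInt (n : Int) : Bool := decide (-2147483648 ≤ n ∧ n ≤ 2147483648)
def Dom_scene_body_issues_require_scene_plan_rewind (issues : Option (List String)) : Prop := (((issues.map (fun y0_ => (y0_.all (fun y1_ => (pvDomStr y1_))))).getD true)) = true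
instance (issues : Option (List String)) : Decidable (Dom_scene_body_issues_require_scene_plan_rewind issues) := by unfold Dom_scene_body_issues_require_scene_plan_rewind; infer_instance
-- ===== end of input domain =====

-- B factors the shared stem out of the seven phrases and scans each issue once by position
-- (stem anchor, then suffix check) instead of seven independent substring searches; same cost.

-- ===== PORT A =====
def scene_body_issues_require_scene_plan_rewind (issues : Option (List String)) : Bool :=
  -- any(... or ... for issue in (issues or []))
  (match issues with | none => [] | some xs => xs).any (fun issue =>
    PySem.Str.isIn "Return to scene_plan and either add the proper casting or declare a new character" issue
    || PySem.Str.isIn "Return to scene_plan and add another named character" issue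
    || PySem.Str.isIn "Return to scene_plan and add NEW_CHARACTERS plus NEW_CHARACTER_INTRO" issue
    || PySem.Str.isIn "Return to scene_plan and change LOCATION_STATUS/NEW_LOCATION" issue
    || PySem.Str.isIn "Return to scene_plan and strengthen LOCATION_STATUS/NEW_LOCATION" issue
    || PySem.Str.isIn "Return to scene_plan and change LOCATION_STATUS so the child scene actually moves now" issue
    || PySem.Str.isIn "Return to scene_plan and strengthen LOCATION_STATUS/RETURN_LOCATION setup" issue)

-- ===== PORT B =====
-- STEM = "Return to scene_plan and "
def pvSTEM : List Char := "Return to scene_plan and ".toList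

-- SUFFIXES tuple
def pvSUFFIXES : List (List Char) := [
  "either add the proper casting or declare a new character".toList,
  "add another named character".toList,
  "add NEW_CHARACTERS plus NEW_CHARACTER_INTRO".toList,
  "change LOCATION_STATUS/NEW_LOCATION".toList,
  "strengthen LOCATION_STATUS/NEW_LOCATION".toList,
  "change LOCATION_STATUS so the child scene actually moves now".toList,
  "strengthen LOCATION_STATUS/RETURN_LOCATION setup".toList]

-- inner positional scan: for j in range(len(issue)): if issue.startswith(STEM, j) and issue.startswith(SUFFIXES, j + n): return True
-- Python s.startswith(p, k) with 0 ≤ k is exactly startswith of the k-suffix: ported as startswith (cs.drop k) p;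
-- tuple startswith is the any over the tuple's members.
def pvScanPositions (cs : List Char) : Bool :=
  (List.range cs.length).any (fun j =>
    PySem.Chars.startswith (cs.drop j) pvSTEM
      && pvSUFFIXES.any (fun suf => PySem.Chars.startswith (cs.drop (j + pvSTEM.length)) suf))

-- outer loop over issues with early return
def pvScanIssues : List String → Bool
  | [] => false
  | issue :: rest => if pvScanPositions issue.toList then true else pvScanIssues rest

def scene_body_issues_require_scene_plan_rewind_alt (issues : Option (List String)) : Bool :=
  pvScanIssues (match issues with | none => [] | some xs => xs)

-- ===== PRECONDITION & SPEC =====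
def Spec_scene_body_issues_require_scene_plan_rewind (issues : Option (List String)) (out : Bool) : Prop := out = scene_body_issues_require_scene_plan_rewind_alt issues
instance (issues : Option (List String)) (out : Bool) : Decidable (Spec_scene_body_issues_require_scene_plan_rewind issues out) := by unfold Spec_scene_body_issues_require_scene_plan_rewind; infer_instance

-- ===== CLAIM (what is proved, stated in full; the proofs are below) =====
def Claim_equal_scene_body_issues_require_scene_plan_rewind : Prop := ∀ (issues : Option (List String)), Dom_scene_body_issues_require_scene_plan_rewind issues → Spec_scene_body_issues_require_scene_plan_rewind issues (scene_body_issues_require_scene_plan_rewind issues)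

-- ===== LEMMAS AND PROOFS =====

-- splitting a prefix made of two pieces
theorem pv_prefix_append_iff (p s t : List Char) :
    p ++ s <+: t ↔ (p <+: t ∧ s <+: t.drop p.length) := by
  constructor
  · rintro ⟨r, rfl⟩
    refine ⟨⟨s ++ r, by simp⟩, ?_⟩
    rw [List.append_assoc, List.drop_left]
    exact ⟨r, rfl⟩
  · rintro ⟨⟨r1, rfl⟩, ⟨r2, h2⟩⟩
    rw [List.drop_left] at h2
    exact ⟨r2, by rw [List.append_assoc, h2]⟩

-- a nonempty prefix of the j-suffix forces j < length
theorem pv_lt_of_prefix_drop {p cs : List Char} {j : Nat} (hp : p ≠ []) (h : p <+: cs.drop j) :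
    j < cs.length := by
  have hl := h.length_le
  rw [List.length_drop] at hl
  have : 0 < p.length := List.length_pos_of_ne_nil hp
  omega

-- the positional scan equals "some stem+suffix phrase occurs as a substring"
theorem pvScanPositions_eq_any (cs : List Char) :
    pvScanPositions cs = pvSUFFIXES.any (fun suf => PySem.Chars.isIn (pvSTEM ++ suf) cs) := by
  rw [Bool.eq_iff_iff]
  simp only [pvScanPositions, List.any_eq_true, List.mem_range, Bool.and_eq_true,
    PySem.Chars.startswith_iff, ← PySem.Chars.exists_prefix_drop_iff_isIn,
    pv_prefix_append_iff, List.drop_drop]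
  constructor
  · rintro ⟨j, _, hstem, suf, hsuf, hpre⟩
    exact ⟨suf, hsuf, j, hstem, by simpa [Nat.add_comm] using hpre⟩
  · rintro ⟨suf, hsuf, j, hstem, hpre⟩
    have hj : j < cs.length := pv_lt_of_prefix_drop (by decide) hstem
    exact ⟨j, hj, hstem, suf, hsuf, by simpa [Nat.add_comm] using hpre⟩

-- A's seven-way chain, named for the proof
def pvChain (issue : String) : Bool :=
  PySem.Str.isIn "Return to scene_plan and either add the proper casting or declare a new character" issue
  || PySem.Str.isIn "Return to scene_plan and add another named character" issue
  || PySem.Str.isIn "Return to scene_plan and add NEW_CHARACTERS plus NEW_CHARACTER_INTRO" issue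
  || PySem.Str.isIn "Return to scene_plan and change LOCATION_STATUS/NEW_LOCATION" issue
  || PySem.Str.isIn "Return to scene_plan and strengthen LOCATION_STATUS/NEW_LOCATION" issue
  || PySem.Str.isIn "Return to scene_plan and change LOCATION_STATUS so the child scene actually moves now" issue
  || PySem.Str.isIn "Return to scene_plan and strengthen LOCATION_STATUS/RETURN_LOCATION setup" issue

theorem pvScanPositions_eq_chain (issue : String) :
    pvScanPositions issue.toList = pvChain issue := by
  rw [pvScanPositions_eq_any]
  simp [pvChain, pvSUFFIXES, pvSTEM, Bool.or_assoc]

theorem pvScanIssues_eq_any (xs : List String) :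
    pvScanIssues xs = xs.any pvChain := by
  induction xs with
  | nil => rfl
  | cons x rest ih =>
      rw [List.any_cons, pvScanIssues, pvScanPositions_eq_chain, ih]
      cases pvChain x <;> simp

-- ===== VERDICT (by name: the statement is the Claim_ definition above) =====
theorem scene_body_issues_require_scene_plan_rewind_spec : Claim_equal_scene_body_issues_require_scene_plan_rewind := by
  intro issues _
  unfold Spec_scene_body_issues_require_scene_plan_rewind
  unfold scene_body_issues_require_scene_plan_rewind scene_body_issues_require_scene_plan_rewind_alt
  rw [pvScanIssues_eq_any]
  rfl
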